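-- pv_equiv track=rewrite | github.com/DylanSalisbury/advent-of-code-2019 | 04/util.py | part1_inc
-- ===== SOURCE A (Python) =====
-- def part1_inc(n):
--   digits = list(str(n + 1))
--   will_succeed = False
--   for i in range(1, len(digits)):
--     if digits[i] <= digits[i - 1]:
--       will_succeed = True
--     if digits[i] < digits[i - 1]:
--       for j in range(i, len(digits)):
--         digits[j] = digits[i - 1]
--
--   # This is an optimization, but makes it hard to define
--   # and function's behavior succinctly.
--   #
--   # if not will_succeed:
--   #   digits[len(digits) - 1] = '9'
--
--   return (int(''.join(digits)), will_succeed)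
-- ===== SOURCE B (Python) =====
-- def part1_inc(n):
--     def fill(prev, rest):
--         # at the first strict descent, the rest of the digits all become prev
--         if not rest:
--             return []
--         c = rest[0]
--         if c < prev:
--             return [prev] * len(rest)
--         return [c] + fill(c, rest[1:])
--
--     ds = list(str(n + 1))
--     out = [ds[0]] + fill(ds[0], ds[1:])
--     flag = any(x == y for x, y in zip(out, out[1:]))
--     return (int(''.join(out)), flag)
-- ===== Notes on version B (the rewrite author's own statement) =====
-- stated objective: simpler
-- what changed: B replaces A's index loop with an inner overwrite loop and an inline flag by a single front-to-back recursive pass that cuts off at the first descent with a replicated digit, plus a separate adjacent-equal-pair scan for the flag.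
import Mathlib
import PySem

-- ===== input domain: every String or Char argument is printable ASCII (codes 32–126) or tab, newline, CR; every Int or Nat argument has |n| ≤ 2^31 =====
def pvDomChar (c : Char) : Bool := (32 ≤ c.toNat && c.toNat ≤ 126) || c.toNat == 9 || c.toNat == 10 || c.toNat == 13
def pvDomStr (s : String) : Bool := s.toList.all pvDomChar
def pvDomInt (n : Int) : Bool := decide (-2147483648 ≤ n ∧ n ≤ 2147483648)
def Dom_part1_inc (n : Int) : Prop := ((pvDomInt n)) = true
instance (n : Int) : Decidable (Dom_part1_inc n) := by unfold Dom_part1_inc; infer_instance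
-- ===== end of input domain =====

-- B rebuilds the non-decreasing digits in one front-to-back recursive pass (cutting off at the
-- first descent with a replicate) and reads the flag as "result has an adjacent equal pair",
-- instead of A's index loop with an inner overwrite loop and an inline flag; objective: simpler.

-- ===== PORT A =====
-- loop body of A's 'for i in range(1, len(digits))', on state (digits, will_succeed)
def pvStepA (st : List Char × Bool) (i : Int) : List Char × Bool :=
  let ws := if PySem.List.pyGetD st.1 i ' ' ≤ PySem.List.pyGetD st.1 (i - 1) ' ' then true else st.2
  let ds :=
    if PySem.List.pyGetD st.1 i ' ' < PySem.List.pyGetD st.1 (i - 1) ' ' then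
      (PySem.List.pyRange i (PySem.List.len st.1) 1).foldl
        (fun ds j => PySem.List.pySetD ds j (PySem.List.pyGetD ds (i - 1) ' ')) st.1
    else st.1
  (ds, ws)

def part1_inc (n : Int) : Int × Bool :=
  let digits := PySem.Int.toChars (n + 1)
  let st := (PySem.List.pyRange 1 (PySem.List.len digits) 1).foldl pvStepA (digits, false)
  -- int(''.join(digits)): the digit list always parses (it comes from str(n+1)), so getD 0 is never taken
  ((PySem.Int.ofChars? st.1).getD 0, st.2)

-- ===== PORT B =====
-- Source B's helper 'fill(prev, rest)'
def pvFillB (prev : Char) (rest : List Char) : List Char :=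
  match rest with
  | [] => []
  | c :: t => if c < prev then List.replicate (c :: t).length prev else c :: pvFillB c t

def part1_inc_alt (n : Int) : Int × Bool :=
  let ds := PySem.Int.toChars (n + 1)
  -- ds = str(n+1) is never empty, so ds[0] never raises; the [] branch is unreachable
  let out := match ds with
    | [] => []
    | h :: t => h :: pvFillB h t
  let flag := (out.zip (out.drop 1)).any (fun p => p.1 == p.2)
  ((PySem.Int.ofChars? out).getD 0, flag)

-- ===== PRECONDITION & SPEC =====
def Spec_part1_inc (n : Int) (out : Int × Bool) : Prop := out = part1_inc_alt n
instance (n : Int) (out : Int × Bool) : Decidable (Spec_part1_inc n out) := by unfold Spec_part1_inc; infer_instance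

-- ===== CLAIM (what is proved, stated in full; the proofs are below) =====
def Claim_equal_part1_inc : Prop := ∀ (n : Int), Dom_part1_inc n → Spec_part1_inc n (part1_inc n)

-- ===== LEMMAS AND PROOFS =====

-- A's flag, read off the original tail: true iff some digit is ≤ its predecessor
def pvSpecFlag : Char → List Char → Bool
  | _, [] => false
  | p, c :: t => (decide (c ≤ p)) || pvSpecFlag c t

theorem pv_getD_mid (pre : List Char) (x : Char) (t : List Char) :
    (pre ++ x :: t).getD pre.length ' ' = x := by
  simp [List.getD]

theorem pv_getD_rep (pre : List Char) (p : Char) (m j : Nat) (h1 : pre.length ≤ j)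
    (h2 : j ≤ pre.length + m) :
    (pre ++ p :: List.replicate m p).getD j ' ' = p := by
  have : p :: List.replicate m p = List.replicate (m + 1) p := by simp [List.replicate_succ]
  rw [this, List.getD, List.getElem?_append_right h1, List.getElem?_replicate]
  have : j - pre.length < m + 1 := by omega
  simp [this]

theorem pv_toChars_ne_nil (n : Int) : PySem.Int.toChars n ≠ [] := by
  unfold PySem.Int.toChars
  split
  · simp
  · have h := @Nat.length_toDigits_pos 10 n.toNat
    intro hc
    rw [hc] at h
    simp at h

theorem pv_fill_eq (r : Int) (hr : 0 ≤ r) :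
    ∀ (fuel : Nat) (k : Int) (ds : List Char), r < k → fuel = ((ds.length : Int) - k).toNat →
    (PySem.List.pyRange k ((ds.length : Int)) 1).foldl
        (fun ds j => PySem.List.pySetD ds j (PySem.List.pyGetD ds r ' ')) ds
      = ds.take k.toNat ++ List.replicate ((ds.length : Int) - k).toNat (PySem.List.pyGetD ds r ' ') := by
  intro fuel
  induction fuel with
  | zero =>
    intro k ds hk hf
    have hle : (ds.length : Int) ≤ k := by omega
    rw [PySem.List.pyRange_one_eq_nil hle]
    have h1 : ((ds.length : Int) - k).toNat = 0 := by omega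
    have h2 : ds.length ≤ k.toNat := by omega
    simp [h1, List.take_of_length_le h2]
  | succ m ih =>
    intro k ds hk hf
    have hklt : k < (ds.length : Int) := by omega
    have hk0 : 0 ≤ k := by omega
    rw [PySem.List.pyRange_one_cons hklt]
    simp only [List.foldl_cons]
    set c := PySem.List.pyGetD ds r ' ' with hc
    have hkn : k.toNat < ds.length := by omega
    -- the one step
    have hset : PySem.List.pySetD ds k c = ds.set k.toNat c :=
      PySem.List.pySetD_of_nonneg ds c hk0
    have hlen : (ds.set k.toNat c).length = ds.length := by simp
    -- reading r is unchanged
    have hread : PySem.List.pyGetD (ds.set k.toNat c) r ' ' = c := by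
      rw [PySem.List.pyGetD_of_nonneg _ _ hr, hc, PySem.List.pyGetD_of_nonneg _ _ hr]
      have : r.toNat ≠ k.toNat := by omega
      simp [List.getElem?_set_ne (Ne.symm this)]
    have ih' := ih (k + 1) (ds.set k.toNat c) (by omega) (by rw [hlen]; omega)
    rw [hset]
    -- rewrite the fold body to read from the set list
    have hbody :
        (PySem.List.pyRange (k+1) (((ds.set k.toNat c).length : Int)) 1).foldl
          (fun ds j => PySem.List.pySetD ds j (PySem.List.pyGetD ds r ' ')) (ds.set k.toNat c)
        = (ds.set k.toNat c).take (k+1).toNat ++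
            List.replicate (((ds.set k.toNat c).length : Int) - (k+1)).toNat
              (PySem.List.pyGetD (ds.set k.toNat c) r ' ') := ih'
    rw [hlen] at hbody
    rw [hread] at hbody
    rw [hbody]
    -- take (k+1) (set k c) = take k ds ++ [c]
    have hts : (ds.set k.toNat c).take (k+1).toNat = ds.take k.toNat ++ [c] := by
      have h1 : (k+1).toNat = k.toNat + 1 := by omega
      rw [h1, List.set_eq_take_append_cons_drop, if_pos hkn]
      rw [List.take_append]
      have hlt : (ds.take k.toNat).length = k.toNat := by simp; omega
      simp [hlt]
    rw [hts]
    have hrep : ((ds.length : Int) - k).toNat = (((ds.length : Int)) - (k+1)).toNat + 1 := by omega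
    rw [hrep, List.replicate_succ]
    simp

theorem pv_loop_const (b : Int) :
    ∀ (fuel : Nat) (k : Int) (ds : List Char), 1 ≤ k → fuel = (b - k).toNat →
    (∀ j : Int, k ≤ j → j < b → PySem.List.pyGetD ds j ' ' = PySem.List.pyGetD ds (j - 1) ' ') →
    (PySem.List.pyRange k b 1).foldl pvStepA (ds, true) = (ds, true) := by
  intro fuel
  induction fuel with
  | zero =>
    intro k ds hk hf h
    rw [PySem.List.pyRange_one_eq_nil (by omega)]
    rfl
  | succ m ih =>
    intro k ds hk hf h
    by_cases hkb : k < b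
    · rw [PySem.List.pyRange_one_cons hkb]
      simp only [List.foldl_cons]
      have heq := h k le_rfl hkb
      have hstep : pvStepA (ds, true) k = (ds, true) := by
        unfold pvStepA
        simp [heq]
      rw [hstep]
      exact ih (k + 1) ds (by omega) (by omega) (fun j hj1 hj2 => h j (by omega) hj2)
    · rw [PySem.List.pyRange_one_eq_nil (by omega)]
      rfl

theorem pv_loopA_eq :
    ∀ (t pre : List Char) (prev : Char) (ws : Bool),
    (PySem.List.pyRange ((pre.length : Int) + 1) ((pre.length : Int) + 1 + t.length) 1).foldl
        pvStepA (pre ++ prev :: t, ws)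
      = (pre ++ prev :: pvFillB prev t, ws || pvSpecFlag prev t) := by
  intro t
  induction t with
  | nil =>
    intro pre prev ws
    rw [PySem.List.pyRange_one_eq_nil (by simp)]
    simp [pvFillB, pvSpecFlag]
  | cons c t' ih =>
    intro pre prev ws
    set a : Int := (pre.length : Int) + 1 with ha
    have hab : a < a + ((c :: t').length : Int) := by simp
    rw [PySem.List.pyRange_one_cons hab]
    simp only [List.foldl_cons]
    have hds : pre ++ prev :: c :: t' = (pre ++ [prev]) ++ c :: t' := by simp
    have hgi : PySem.List.pyGetD (pre ++ prev :: c :: t') a ' ' = c := by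
      rw [PySem.List.pyGetD_of_nonneg _ _ (by omega)]
      have h1 : a.toNat = (pre ++ [prev]).length := by simp [ha]
      rw [hds, h1, pv_getD_mid]
    have hgi1 : PySem.List.pyGetD (pre ++ prev :: c :: t') (a - 1) ' ' = prev := by
      rw [PySem.List.pyGetD_of_nonneg _ _ (by omega)]
      have h1 : (a - 1).toNat = pre.length := by omega
      rw [h1, pv_getD_mid]
    by_cases hlt : c < prev
    · -- fill happens; afterwards the suffix is constant and the loop is inert
      have hstep : pvStepA (pre ++ prev :: c :: t', ws) a
          = (pre ++ prev :: List.replicate (t'.length + 1) prev, true) := by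
        unfold pvStepA
        simp only [hgi, hgi1, if_pos hlt, if_pos (le_of_lt hlt), PySem.List.len_eq]
        rw [pv_fill_eq (a - 1) (by omega) (((pre ++ prev :: c :: t').length : Int) - a).toNat a
          (pre ++ prev :: c :: t') (by omega) rfl]
        rw [hgi1]
        have h2 : a.toNat = (pre ++ [prev]).length := by simp [ha]
        have h3 : (((pre ++ prev :: c :: t').length : Int) - a).toNat = t'.length + 1 := by
          simp [ha]
        rw [h2, h3, hds, List.take_left]
        simp [List.replicate_succ]
      rw [hstep]
      have hconst := pv_loop_const (a + ((c :: t').length : Int))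
        ((a + ((c :: t').length : Int) - (a + 1)).toNat) (a + 1)
        (pre ++ prev :: List.replicate (t'.length + 1) prev) (by omega) rfl
        (by
          intro j hj1 hj2
          rw [PySem.List.pyGetD_of_nonneg _ _ (by omega),
              PySem.List.pyGetD_of_nonneg _ _ (by omega)]
          rw [pv_getD_rep pre prev (t'.length + 1) j.toNat (by omega) (by simp at hj2 ⊢; omega),
              pv_getD_rep pre prev (t'.length + 1) (j - 1).toNat (by omega) (by simp at hj2; omega)])
      rw [hconst]
      have hflag : pvSpecFlag prev (c :: t') = true := by
        simp [pvSpecFlag, le_of_lt hlt]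
      rw [hflag]
      have hfill : pvFillB prev (c :: t') = List.replicate (c :: t').length prev := by
        simp [pvFillB, hlt]
      rw [hfill]
      simp
    · -- no fill: step only updates the flag, then recurse with pre ++ [prev]
      have hstep : pvStepA (pre ++ prev :: c :: t', ws) a
          = (pre ++ prev :: c :: t', (decide (c ≤ prev)) || ws) := by
        unfold pvStepA
        simp only [hgi, hgi1, if_neg hlt]
        by_cases hle : c ≤ prev <;> simp [hle]
      rw [hstep]
      have ih' := ih (pre ++ [prev]) c ((decide (c ≤ prev)) || ws)
      have hr1 : ((pre ++ [prev]).length : Int) + 1 = a + 1 := by simp [ha]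
      have hr2 : a + 1 + (t'.length : Int) = a + ((c :: t').length : Int) := by
        simp [ha]; ring
      rw [hr1] at ih'
      rw [hr2] at ih'
      have hds2 : (pre ++ [prev]) ++ c :: t' = pre ++ prev :: c :: t' := by simp
      rw [hds2] at ih'
      have hds3 : (pre ++ [prev]) ++ c :: pvFillB c t' = pre ++ prev :: c :: pvFillB c t' := by simp
      rw [hds3] at ih'
      rw [ih']
      have hfill : pvFillB prev (c :: t') = c :: pvFillB c t' := by
        simp [pvFillB, hlt]
      rw [hfill]
      have : (((decide (c ≤ prev)) || ws) || pvSpecFlag c t')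
          = (ws || pvSpecFlag prev (c :: t')) := by
        simp only [pvSpecFlag]
        rw [Bool.or_assoc, Bool.or_left_comm]
      rw [this]

theorem pv_adj_eq :
    ∀ (t : List Char) (prev : Char),
    ((prev :: pvFillB prev t).zip ((prev :: pvFillB prev t).drop 1)).any (fun p => p.1 == p.2)
      = pvSpecFlag prev t := by
  intro t
  induction t with
  | nil => intro prev; simp [pvFillB, pvSpecFlag]
  | cons c t' ih =>
    intro prev
    by_cases hlt : c < prev
    · have hfill : pvFillB prev (c :: t') = List.replicate (c :: t').length prev := by
        simp [pvFillB, hlt]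
      rw [hfill]
      simp [List.replicate_succ, pvSpecFlag, le_of_lt hlt]
    · have hfill : pvFillB prev (c :: t') = c :: pvFillB c t' := by
        simp [pvFillB, hlt]
      rw [hfill]
      have ih' := ih c
      simp only [List.drop_one, List.tail_cons] at ih' ⊢
      simp only [List.zip_cons_cons, List.any_cons] at ih' ⊢
      have hbeq : (prev == c) = decide (c ≤ prev) := by
        by_cases hEq : c = prev
        · subst hEq; simp
        · have h1 : ¬ c ≤ prev := fun hle => hlt (lt_of_le_of_ne hle hEq)
          simp [h1, Ne.symm hEq]
      rw [hbeq, ih']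
      simp [pvSpecFlag]

-- ===== VERDICT (by name: the statement is the Claim_ definition above) =====
theorem part1_inc_spec : Claim_equal_part1_inc := by
  intro n _
  unfold Spec_part1_inc part1_inc part1_inc_alt
  obtain ⟨h, t, hd⟩ : ∃ h t, PySem.Int.toChars (n + 1) = h :: t := by
    cases hc : PySem.Int.toChars (n + 1) with
    | nil => exact absurd hc (pv_toChars_ne_nil (n + 1))
    | cons h t => exact ⟨h, t, rfl⟩
  simp only [hd]
  have hmain := pv_loopA_eq t [] h false
  simp only [List.nil_append, List.length_nil, Nat.cast_zero, zero_add, Bool.false_or] at hmain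
  have he : PySem.List.len (h :: t) = 1 + (t.length : Int) := by
    simp [PySem.List.len_eq]; ring
  rw [he, hmain, pv_adj_eq]
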